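-- pv_equiv track=rewrite | github.com/wilmurillo-ai/Design-Assistant | .skills/openclaw-skills/skills/fosunwealth/fw-tradings/fosun-trading/code/credential_flow.py | _parse_env_file
-- ===== SOURCE A (Python) =====
-- def _parse_env_file(text):
--     result = {}
--     lines = text.splitlines()
--     i = 0
--     while i < len(lines):
--         line = lines[i].strip()
--         if not line or line.startswith("#"):
--             i += 1
--             continue
--         key, sep, val = line.partition("=")
--         if not sep:
--             i += 1
--             continue
--         key, val = key.strip(), val.strip()
--         if val.startswith("-----BEGIN "):
--             pem_lines = [val]
--             i += 1
--             while i < len(lines):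
--                 pem_line = lines[i].rstrip()
--                 pem_lines.append(pem_line)
--                 if pem_line.strip().startswith("-----END "):
--                     i += 1
--                     break
--                 i += 1
--             val = "\n".join(pem_lines)
--         else:
--             i += 1
--         if key:
--             result[key] = val
--     return result
-- ===== SOURCE B (Python) =====
-- def _parse_env_file(text):
--     # Flat single-pass state machine over the lines (no index juggling / nested loop).
--     result = {}
--     in_pem = False
--     pem_key = None
--     pem_lines = []
--     for raw in text.splitlines():
--         if in_pem:
--             p = raw.rstrip()
--             pem_lines.append(p)
--             if p.strip().startswith("-----END "):
--                 if pem_key: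
--                     result[pem_key] = "\n".join(pem_lines)
--                 in_pem = False
--         else:
--             line = raw.strip()
--             if not line or line.startswith("#"):
--                 continue
--             key, sep, val = line.partition("=")
--             if not sep:
--                 continue
--             key, val = key.strip(), val.strip()
--             if val.startswith("-----BEGIN "):
--                 in_pem = True
--                 pem_key = key
--                 pem_lines = [val]
--             elif key:
--                 result[key] = val
--     if in_pem and pem_key:
--         result[pem_key] = "\n".join(pem_lines)
--     return result
-- ===== Notes on version B (the rewrite author's own statement) =====
-- stated objective: simpler
-- what changed: Replaces the index-driven outer while loop with a nested inner while for PEM blocks by one flat for-loop over splitlines() driven by an in_pem flag with a pending key and accumulator, flushed once after the loop.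
import Mathlib
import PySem

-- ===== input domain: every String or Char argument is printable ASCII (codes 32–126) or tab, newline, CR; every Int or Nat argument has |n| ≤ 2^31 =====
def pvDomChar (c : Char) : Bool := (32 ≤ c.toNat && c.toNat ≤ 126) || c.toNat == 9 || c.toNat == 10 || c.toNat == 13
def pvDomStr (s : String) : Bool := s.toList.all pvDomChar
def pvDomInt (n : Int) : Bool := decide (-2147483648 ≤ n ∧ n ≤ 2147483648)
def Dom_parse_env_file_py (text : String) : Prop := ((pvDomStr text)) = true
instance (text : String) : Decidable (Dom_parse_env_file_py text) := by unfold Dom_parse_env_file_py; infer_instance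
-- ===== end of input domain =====

-- B replaces A's index-driven while loop with a nested PEM while by one flat fold with an
-- in-PEM state flag, flushed once after the loop (objective: simpler decomposition; same cost).

-- shared helper: exact hand port of Python's line.partition("=") (none = separator absent)
def partEq : List Char → Option (List Char × List Char)
  | [] => none
  | c :: cs => if c = '=' then some ([], cs) else (partEq cs).map (fun p => (c :: p.1, p.2))

def partitionEq (s : String) : Option (String × String) :=
  (partEq s.toList).map (fun p => (String.ofList p.1, String.ofList p.2))

-- ===== PORT A =====
-- inner 'while i < len(lines)' PEM loop: returns (pem_lines, remaining lines)
def pemLoopA : List String → List String → List String × List String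
  | [], acc => (acc, [])
  | l :: rest, acc =>
    let p := PySem.Str.rstrip l
    if PySem.Str.startswith (PySem.Str.strip p) "-----END " then (acc ++ [p], rest)
    else pemLoopA rest (acc ++ [p])

theorem pemLoopA_len_le (ls : List String) : ∀ acc, (pemLoopA ls acc).2.length ≤ ls.length := by
  induction ls with
  | nil => intro acc; simp [pemLoopA]
  | cons l rest ih =>
    intro acc
    simp only [pemLoopA]
    split
    · simp
    · exact Nat.le_trans (ih _) (Nat.le_succ _)

-- outer 'while i < len(lines)' loop, recursing on the remaining lines
def goA (ls : List String) (d : PySem.Dict String String) : PySem.Dict String String :=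
  match ls with
  | [] => d
  | l :: rest =>
    let line := PySem.Str.strip l
    if line = "" ∨ PySem.Str.startswith line "#" then goA rest d
    else
      match partitionEq line with
      | none => goA rest d
      | some kv =>
        let key := PySem.Str.strip kv.1
        let val := PySem.Str.strip kv.2
        if PySem.Str.startswith val "-----BEGIN " then
          let pr := pemLoopA rest [val]
          goA pr.2 (if key ≠ "" then d.insert key (PySem.Str.join "\n" pr.1) else d)
        else
          goA rest (if key ≠ "" then d.insert key val else d)
termination_by ls.length
decreasing_by
  all_goals first
    | exact Nat.lt_succ_of_le (pemLoopA_len_le _ _)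
    | simp

def parse_env_file_py (text : String) : List (String × String) :=
  (goA (PySem.Str.splitlines text) PySem.Dict.empty).items

-- ===== PORT B =====
-- flat state machine: state = (Option (pending key, accumulated PEM lines), dict so far)
def stepB (st : Option (String × List String) × PySem.Dict String String) (raw : String) :
    Option (String × List String) × PySem.Dict String String :=
  match st with
  | (some (k, acc), d) =>
    let p := PySem.Str.rstrip raw
    let acc' := acc ++ [p]
    if PySem.Str.startswith (PySem.Str.strip p) "-----END " then
      (none, if k ≠ "" then d.insert k (PySem.Str.join "\n" acc') else d)
    else (some (k, acc'), d)
  | (none, d) =>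
    let line := PySem.Str.strip raw
    if line = "" ∨ PySem.Str.startswith line "#" then (none, d)
    else
      match partitionEq line with
      | none => (none, d)
      | some kv =>
        let key := PySem.Str.strip kv.1
        let val := PySem.Str.strip kv.2
        if PySem.Str.startswith val "-----BEGIN " then (some (key, [val]), d)
        else if key ≠ "" then (none, d.insert key val) else (none, d)

-- the post-loop flush of a still-open PEM block
def finishB (st : Option (String × List String) × PySem.Dict String String) :
    PySem.Dict String String :=
  match st with
  | (some (k, acc), d) => if k ≠ "" then d.insert k (PySem.Str.join "\n" acc) else d
  | (none, d) => d

def parse_env_file_py_alt (text : String) : List (String × String) :=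
  (finishB ((PySem.Str.splitlines text).foldl stepB (none, PySem.Dict.empty))).items

-- ===== PRECONDITION & SPEC =====
def Spec_parse_env_file_py (text : String) (out : List (String × String)) : Prop := out = parse_env_file_py_alt text
instance (text : String) (out : List (String × String)) : Decidable (Spec_parse_env_file_py text out) := by unfold Spec_parse_env_file_py; infer_instance

-- ===== CLAIM (what is proved, stated in full; the proofs are below) =====
def Claim_equal_parse_env_file_py : Prop := ∀ (text : String), Dom_parse_env_file_py text → Spec_parse_env_file_py text (parse_env_file_py text)

-- ===== LEMMAS AND PROOFS =====
theorem goA_nil (d : PySem.Dict String String) : goA [] d = d := by rw [goA]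

theorem goA_cons (l : String) (rest : List String) (d : PySem.Dict String String) :
    goA (l :: rest) d =
    (let line := PySem.Str.strip l
    if line = "" ∨ PySem.Str.startswith line "#" then goA rest d
    else
      match partitionEq line with
      | none => goA rest d
      | some kv =>
        let key := PySem.Str.strip kv.1
        let val := PySem.Str.strip kv.2
        if PySem.Str.startswith val "-----BEGIN " then
          let pr := pemLoopA rest [val]
          goA pr.2 (if key ≠ "" then d.insert key (PySem.Str.join "\n" pr.1) else d)
        else
          goA rest (if key ≠ "" then d.insert key val else d)) := by
  rw [goA]

-- A's two loops against B's single fold: proved together, one induction on the lines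
theorem goA_eq_fold (ls : List String) :
    (∀ d, goA ls d = finishB (ls.foldl stepB (none, d))) ∧
    (∀ k acc d,
      goA (pemLoopA ls acc).2
          (if k ≠ "" then d.insert k (PySem.Str.join "\n" (pemLoopA ls acc).1) else d)
        = finishB (ls.foldl stepB (some (k, acc), d))) := by
  induction ls with
  | nil =>
    constructor
    · intro d; rw [goA_nil]; rfl
    · intro k acc d; simp only [pemLoopA, List.foldl_nil, goA_nil, finishB]
  | cons l rest ih =>
    constructor
    · intro d
      rw [goA_cons]
      simp only [List.foldl_cons, stepB]
      by_cases h1 : PySem.Str.strip l = "" ∨ PySem.Str.startswith (PySem.Str.strip l) "#"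
      · simp only [if_pos h1]; exact ih.1 d
      · simp only [if_neg h1]
        cases hp : partitionEq (PySem.Str.strip l) with
        | none => exact ih.1 d
        | some kv =>
          by_cases h2 : PySem.Str.startswith (PySem.Str.strip kv.2) "-----BEGIN "
          · simp only [if_pos h2]; exact ih.2 _ _ d
          · simp only [if_neg h2]
            by_cases h3 : PySem.Str.strip kv.1 ≠ ""
            · simp only [if_pos h3]; exact ih.1 _
            · simp only [if_neg h3]; exact ih.1 _
    · intro k acc d
      simp only [pemLoopA, List.foldl_cons, stepB]
      by_cases h1 : PySem.Str.startswith (PySem.Str.strip (PySem.Str.rstrip l)) "-----END "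
      · simp only [if_pos h1]; exact ih.1 _
      · simp only [if_neg h1]; exact ih.2 _ _ d

-- ===== VERDICT (by name: the statement is the Claim_ definition above) =====
theorem parse_env_file_py_spec : Claim_equal_parse_env_file_py := by
  intro text _
  unfold Spec_parse_env_file_py parse_env_file_py parse_env_file_py_alt
  rw [(goA_eq_fold (PySem.Str.splitlines text)).1]
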